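-- pv_equiv track=rewrite | github.com/Chri5pp/FFT-bachelor-project | FFT big int multiplication/FFT Error measurement.py | mod_FFT
-- ===== SOURCE A (Python) =====
-- def bit_reversal_permutation(x):
--     N = len(x)
--     i_reverse = 0
--     for i in range(1, N):
--         bit = N >> 1
--         while i_reverse & bit:
--             i_reverse ^= bit
--             bit >>= 1
--         i_reverse ^= bit
--
--         if i < i_reverse: # avoid double swapping
--             x[i], x[i_reverse] = x[i_reverse], x[i]
--     return x
--
-- def mod_FFT(x, w, p):
--     N = len(x)
--     if N  == 1: return x
--     x = bit_reversal_permutation(x)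
--
--     # precompute twiddle factors
--     W = [0] * (N // 2)
--
--     W[0] = 1
--     for k in range(1, N // 2):
--         W[k] = W[k-1] * w % p
--
--     length = 2
--     step_size = N >> 1
--     while length <= N:
--         half_length = length >> 1
--         for i in range(0, N, length):
--             step = 0
--             for k in range(half_length):
--                 t1 = x[i + k]
--                 t2 = W[step] * x[i + k + half_length] % p
--                 x[i + k]               = (t1 + t2) % p
--                 x[i + k + half_length] = (t1 - t2) % p
--                 step += step_size
--         length <<= 1
--         step_size >>= 1
--
--     return x
-- ===== SOURCE B (Python) =====
-- def bit_reversal_permutation(x):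
--     N = len(x)
--     i_reverse = 0
--     for i in range(1, N):
--         bit = N >> 1
--         while i_reverse & bit:
--             i_reverse ^= bit
--             bit >>= 1
--         i_reverse ^= bit
--
--         if i < i_reverse: # avoid double swapping
--             x[i], x[i_reverse] = x[i_reverse], x[i]
--     return x
--
-- def _combine_rec(y, w, p):
--     # y is a bit-reversed block; transform it by recursive halves-combine.
--     n = len(y)
--     if n == 1:
--         return y
--     half = n >> 1
--     w2 = w * w % p
--     a = _combine_rec(y[:half], w2, p)
--     b = _combine_rec(y[half:], w2, p)
--     lo, hi, wp = [], [], 1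
--     for e, o in zip(a, b):
--         t = wp * o % p
--         lo.append((e + t) % p)
--         hi.append((e - t) % p)
--         wp = wp * w % p
--     return lo + hi
--
-- def mod_FFT(x, w, p):
--     if len(x) == 1:
--         return x
--     bit_reversal_permutation(x)
--     x[:] = _combine_rec(x, w, p)
--     return x
-- ===== Notes on version B (the rewrite author's own statement) =====
-- stated objective: alternative
-- what changed: The butterfly phase is restructured: instead of A's precomputed twiddle table plus triple-nested in-place index loop over growing stage lengths, B recursively transforms the two halves of the bit-reversed array with the squared root w*w%p and combines them with a single zip pass accumulating powers of w (the shared bit-reversal preprocessing is kept).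
import Mathlib
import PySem

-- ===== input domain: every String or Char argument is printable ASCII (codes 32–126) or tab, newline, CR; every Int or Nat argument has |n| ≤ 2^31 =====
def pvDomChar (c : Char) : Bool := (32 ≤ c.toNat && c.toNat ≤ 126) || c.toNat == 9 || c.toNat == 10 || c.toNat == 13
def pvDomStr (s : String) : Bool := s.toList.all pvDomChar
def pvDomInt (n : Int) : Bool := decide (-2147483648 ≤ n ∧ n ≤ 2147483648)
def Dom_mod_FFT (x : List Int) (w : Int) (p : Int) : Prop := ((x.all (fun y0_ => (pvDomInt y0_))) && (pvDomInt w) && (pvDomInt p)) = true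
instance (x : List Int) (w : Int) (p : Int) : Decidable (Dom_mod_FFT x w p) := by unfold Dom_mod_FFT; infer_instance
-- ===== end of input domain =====

-- B restructures the butterfly phase: recursion on halves with squared root + one zip pass with an
-- accumulated power of w, instead of A's twiddle table + triple-nested in-place index loop
-- (objective: alternative; same O(n log n) cost). Both Pythons mutate x in place; the equivalence
-- proved here is about the RETURN value (B performs the same final mutation via x[:] = ...).


-- ===== PORT A =====
-- helper bit_reversal_permutation is token-identical in Source A and Source B, so both ports share it.

-- inner 'while i_reverse & bit: ...' loop, returning the final 'i_reverse ^= bit' value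
def brWhile (ir : Nat) (bit : Nat) : Nat :=
  if h : ir &&& bit ≠ 0 then brWhile (ir ^^^ bit) (bit >>> 1) else ir ^^^ bit
termination_by bit
decreasing_by
  have hb : bit ≠ 0 := by rintro rfl; simp at h
  have : bit >>> 1 = bit / 2 := by simp [Nat.shiftRight_eq_div_pow]
  omega

-- x[i] is read/written with getD/set (exact for the in-range indices the admitted inputs produce)
def bit_reversal_permutation (x : List Int) : List Int :=
  (((List.range' 1 (x.length - 1) 1).foldl (fun st i =>
      let ir := brWhile st.2 (x.length >>> 1)
      if i < ir then ((st.1.set i (st.1.getD ir 0)).set ir (st.1.getD i 0), ir) else (st.1, ir))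
    (x, 0))).1

-- W = [0]*(N//2); W[0] = 1; for k in range(1, N//2): W[k] = W[k-1]*w % p
def buildW (w p : Int) (N : Nat) : List Int :=
  (List.range' 1 (N / 2 - 1) 1).foldl
    (fun W k => W.set k (PySem.Int.mod (W.getD (k - 1) 0 * w) p))
    ((List.replicate (N / 2) (0 : Int)).set 0 1)

-- for k in range(half_length): butterfly at i+k / i+k+half, step accumulator; r = iterations left
def innerLoop (W : List Int) (p : Int) (half step i : Nat) : Nat → Nat → Nat → List Int → List Int
  | 0, _, _, z => z
  | r + 1, k, stp, z =>
      let t1 := z.getD (i + k) 0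
      let t2 := PySem.Int.mod (W.getD stp 0 * z.getD (i + k + half) 0) p
      innerLoop W p half step i r (k + 1) (stp + step)
        ((z.set (i + k) (PySem.Int.mod (t1 + t2) p)).set (i + k + half) (PySem.Int.mod (t1 - t2) p))

-- for i in range(0, N, L): (0 < L is a totality guard; Python raises on step 0, never reached)
def outerLoop (W : List Int) (p : Int) (N L half step : Nat) (i : Nat) (z : List Int) : List Int :=
  if h : i < N ∧ 0 < L then
    outerLoop W p N L half step (i + L) (innerLoop W p half step i half 0 0 z)
  else z
termination_by N - i
decreasing_by omega

-- while length <= N: (2 ≤ L is a totality guard; L starts at 2 and doubles)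
def stageLoop (W : List Int) (p : Int) (N : Nat) (L step : Nat) (z : List Int) : List Int :=
  if h : L ≤ N ∧ 2 ≤ L then
    stageLoop W p N (L <<< 1) (step >>> 1) (outerLoop W p N L (L >>> 1) step 0 z)
  else z
termination_by N + 1 - L
decreasing_by
  have : L <<< 1 = 2 * L := by simp [Nat.shiftLeft_eq]; ring
  omega

def mod_FFT (x : List Int) (w : Int) (p : Int) : List Int :=
  if x.length == 1 then x
  else
    stageLoop (buildW w p x.length) p x.length 2 (x.length >>> 1) (bit_reversal_permutation x)

-- ===== PORT B =====
-- lo, hi, wp = [], [], 1; for e, o in zip(a, b): ...; return lo + hi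
def combineFold (w p : Int) (a b : List Int) : List Int :=
  let z := (a.zip b).foldl (fun st eo =>
      let t := PySem.Int.mod (st.2.2 * eo.2) p
      (st.1 ++ [PySem.Int.mod (eo.1 + t) p], st.2.1 ++ [PySem.Int.mod (eo.1 - t) p],
       PySem.Int.mod (st.2.2 * w) p))
    (([] : List Int), ([] : List Int), (1 : Int))
  z.1 ++ z.2.1

-- _combine_rec; the n == 1 base case is widened to n ≤ 1 as a totality guard (Python recurses
-- forever on n = 0, which no admitted input reaches)
def combineRec (y : List Int) (w p : Int) : List Int :=
  if h : y.length ≤ 1 then y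
  else
    let w2 := PySem.Int.mod (w * w) p
    combineFold w p (combineRec (y.take (y.length >>> 1)) w2 p)
                    (combineRec (y.drop (y.length >>> 1)) w2 p)
termination_by y.length
decreasing_by
  all_goals
    simp only [List.length_take, List.length_drop, Nat.shiftRight_eq_div_pow, pow_one]
    omega

def mod_FFT_alt (x : List Int) (w : Int) (p : Int) : List Int :=
  if x.length == 1 then x else combineRec (bit_reversal_permutation x) w p

-- ===== PRECONDITION & SPEC =====
-- Pre_ admits exactly the inputs on which the Python A returns: len(x) a power of two ≥ 1
-- (otherwise IndexError in the stage loops or on W[0]) and, unless len(x) = 1, p ≠ 0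
-- (otherwise ZeroDivisionError in '% p').
def Pre_mod_FFT (x : List Int) (w : Int) (p : Int) : Prop :=
  x.length = 2 ^ Nat.log2 x.length ∧ (x.length = 1 ∨ p ≠ 0)
instance (x : List Int) (w : Int) (p : Int) : Decidable (Pre_mod_FFT x w p) := by
  unfold Pre_mod_FFT; infer_instance

def pvWitness_mod_FFT : List Int × Int × Int := ([1, 2, 3, 4], 3, 7)

def Spec_mod_FFT (x : List Int) (w : Int) (p : Int) (out : List Int) : Prop := out = mod_FFT_alt x w p
instance (x : List Int) (w : Int) (p : Int) (out : List Int) : Decidable (Spec_mod_FFT x w p out) := by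
  unfold Spec_mod_FFT; infer_instance

-- ===== CLAIM (what is proved, stated in full; the proofs are below) =====
def Claim_equal_mod_FFT : Prop := ∀ (x : List Int) (w : Int) (p : Int),
  Dom_mod_FFT x w p → Pre_mod_FFT x w p → Spec_mod_FFT x w p (mod_FFT x w p)

-- ===== LEMMAS AND PROOFS =====

-- accumulated powers of w, reduced mod p from the first multiplication on (W[0] = 1 literal)
def tw (w p : Int) : Nat → Int
  | 0 => 1
  | k + 1 => PySem.Int.mod (tw w p k * w) p

-- one butterfly combine of two equal-length halves, twiddle index stride s
def bfly (Wf : Nat → Int) (p : Int) (s : Nat) (a b : List Int) : List Int :=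
  ((List.range a.length).map fun k =>
      PySem.Int.mod (a.getD k 0 + PySem.Int.mod (Wf (k * s) * b.getD k 0) p) p)
  ++ ((List.range a.length).map fun k =>
      PySem.Int.mod (a.getD k 0 - PySem.Int.mod (Wf (k * s) * b.getD k 0) p) p)

-- clean recursive model of the transform: m levels, twiddle stride s
def modelC (Wf : Nat → Int) (p : Int) : Nat → Nat → List Int → List Int
  | _, 0, y => y
  | s, m + 1, y =>
      bfly Wf p s (modelC Wf p (2 * s) m (y.take (2 ^ m))) (modelC Wf p (2 * s) m (y.drop (2 ^ m)))

-- the (lo, hi) lists produced by one inner k-loop of A, starting at twiddle index stp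
def loHi (W : List Int) (p : Int) (step : Nat) : List Int → List Int → Nat → List Int × List Int
  | e :: M, o :: S, stp =>
      let t := PySem.Int.mod (W.getD stp 0 * o) p
      let r := loHi W p step M S (stp + step)
      (PySem.Int.mod (e + t) p :: r.1, PySem.Int.mod (e - t) p :: r.2)
  | _, _, _ => ([], [])

-- aligned chunks of size L
def chunksOf (L : Nat) (y : List Int) : List (List Int) :=
  if h : y = [] ∨ L = 0 then [] else y.take L :: chunksOf L (y.drop L)
termination_by y.length
decreasing_by
  simp only [List.length_drop]
  rcases List.eq_nil_or_concat y with rfl | _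
  · simp at h
  · have : y.length ≠ 0 := by simpa [List.length_eq_zero_iff] using (not_or.mp h).1
    omega

-- ---- arithmetic lemmas ----
theorem fmod_mul_left (a b p : Int) :
    PySem.Int.mod (PySem.Int.mod a p * b) p = PySem.Int.mod (a * b) p := by
  simp only [PySem.Int.mod]
  conv_lhs => rw [Int.fmod_def a p]
  have h : (a - p * a.fdiv p) * b = a * b + p * (-(a.fdiv p * b)) := by ring
  rw [h, Int.add_mul_fmod_self_left]

theorem fmod_mul_right (a b p : Int) :
    PySem.Int.mod (a * PySem.Int.mod b p) p = PySem.Int.mod (a * b) p := by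
  rw [mul_comm a (PySem.Int.mod b p), fmod_mul_left, mul_comm]

theorem tw_sq (w p : Int) (k : Nat) :
    tw (PySem.Int.mod (w * w) p) p k = tw w p (2 * k) := by
  induction k with
  | zero => rfl
  | succ k ih =>
    have h2 : 2 * (k + 1) = 2 * k + 1 + 1 := by ring
    rw [h2]
    show PySem.Int.mod (tw (PySem.Int.mod (w * w) p) p k * PySem.Int.mod (w * w) p) p = _
    rw [ih]
    show _ = PySem.Int.mod (PySem.Int.mod (tw w p (2 * k) * w) p * w) p
    rw [fmod_mul_right, fmod_mul_left, mul_assoc]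

-- ---- B side ----
theorem combineAux (w p : Int) (a : List Int) : ∀ (b lo hi : List Int) (j : Nat) (q : Int),
    q = tw w p j → a.length = b.length →
    (a.zip b).foldl (fun st eo =>
      let t := PySem.Int.mod (st.2.2 * eo.2) p
      (st.1 ++ [PySem.Int.mod (eo.1 + t) p], st.2.1 ++ [PySem.Int.mod (eo.1 - t) p],
       PySem.Int.mod (st.2.2 * w) p)) (lo, hi, q)
    = (lo ++ (List.range a.length).map (fun k =>
          PySem.Int.mod (a.getD k 0 + PySem.Int.mod (tw w p (j + k) * b.getD k 0) p) p),
       hi ++ (List.range a.length).map (fun k =>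
          PySem.Int.mod (a.getD k 0 - PySem.Int.mod (tw w p (j + k) * b.getD k 0) p) p),
       tw w p (j + a.length)) := by
  induction a with
  | nil => intro b lo hi j q hq h; simp [hq]
  | cons e a' ih =>
    intro b lo hi j q hq h
    cases b with
    | nil => simp at h
    | cons o b' =>
      simp only [List.zip_cons_cons, List.foldl_cons]
      have h' : a'.length = b'.length := by simpa using h
      have hq' : PySem.Int.mod (q * w) p = tw w p (j + 1) := by rw [hq]; rfl
      rw [ih b' _ _ (j + 1) _ hq' h']
      refine Prod.ext ?_ (Prod.ext ?_ ?_) <;>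
        simp [List.range_succ_eq_map, List.map_map, Function.comp, hq,
              Nat.add_right_comm j 1, Nat.add_assoc, Nat.add_comm 1]

theorem combineFold_eq_bfly (w p : Int) (a b : List Int) (h : a.length = b.length) :
    combineFold w p a b = bfly (tw w p) p 1 a b := by
  simp only [combineFold]
  rw [combineAux w p a b [] [] 0 1 rfl h]
  simp [bfly]

theorem modelC_reindex (Wf : Nat → Int) (p : Int) (s m : Nat) (y : List Int) :
    modelC (fun j => Wf (2 * j)) p s m y = modelC Wf p (2 * s) m y := by
  induction m generalizing s y with
  | zero => rfl
  | succ m ih =>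
    simp only [modelC]
    rw [ih, ih]
    unfold bfly
    congr 1
    all_goals
      apply List.map_congr_left
      intro k _
      dsimp only
      have hk : 2 * (k * s) = k * (2 * s) := by ring
      rw [hk]

theorem modelC_length (Wf : Nat → Int) (p : Int) (s m : Nat) (y : List Int)
    (h : y.length = 2 ^ m) : (modelC Wf p s m y).length = y.length := by
  induction m generalizing s y with
  | zero => rfl
  | succ m ih =>
    have hp : (2:Nat) ^ (m + 1) = 2 ^ m + 2 ^ m := by rw [pow_succ]; ring
    have ht : (y.take (2 ^ m)).length = 2 ^ m := by simp [h, hp]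
    simp only [modelC, bfly, List.length_append, List.length_map, List.length_range]
    rw [ih _ _ ht, ht, h, hp]

theorem combineRec_eq_modelC (w p : Int) (m : Nat) (y : List Int) (h : y.length = 2 ^ m) :
    combineRec y w p = modelC (tw w p) p 1 m y := by
  induction m generalizing y w with
  | zero =>
    rw [combineRec]
    simp only [h]
    rfl
  | succ m ih =>
    have h1 : (1:Nat) ≤ 2 ^ m := Nat.one_le_two_pow
    have hp : (2:Nat) ^ (m + 1) = 2 ^ m + 2 ^ m := by rw [pow_succ]; ring
    have hlen2 : ¬ y.length ≤ 1 := by rw [h, hp]; omega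
    rw [combineRec, dif_neg hlen2]
    have hhalf : y.length >>> 1 = 2 ^ m := by
      rw [h, Nat.shiftRight_eq_div_pow, pow_one, hp]; omega
    have ht : (y.take (y.length >>> 1)).length = 2 ^ m := by
      rw [List.length_take, hhalf, h, hp]; omega
    have hd : (y.drop (y.length >>> 1)).length = 2 ^ m := by
      rw [List.length_drop, hhalf, h, hp]; omega
    dsimp only
    rw [ih _ _ ht, ih _ _ hd]
    have htw : tw (PySem.Int.mod (w * w) p) p = fun k => tw w p (2 * k) :=
      funext (tw_sq w p)
    rw [htw, modelC_reindex, modelC_reindex]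
    have hcf := combineFold_eq_bfly w p
      (modelC (tw w p) p (2 * 1) m (y.take (y.length >>> 1)))
      (modelC (tw w p) p (2 * 1) m (y.drop (y.length >>> 1)))
      (by rw [modelC_length _ _ _ _ _ ht, modelC_length _ _ _ _ _ hd, ht, hd])
    rw [hcf]
    simp only [modelC, hhalf]

-- ---- A side ----
theorem getD_append_len (l1 l2 : List Int) (n : Nat) (d : Int) :
    (l1 ++ l2).getD (l1.length + n) d = l2.getD n d := by
  rw [List.getD_append_right _ _ _ _ (Nat.le_add_right _ _)]
  simp

theorem set_append_len (l1 l2 : List Int) (n : Nat) (a : Int) :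
    (l1 ++ l2).set (l1.length + n) a = l1 ++ l2.set n a := by
  simp

theorem buildW_aux (w p : Int) (N : Nat) (hN : 2 ≤ N) :
    ∀ j, j ≤ N / 2 - 1 →
      ((List.range' 1 j 1).foldl
          (fun W k => W.set k (PySem.Int.mod (W.getD (k - 1) 0 * w) p))
          ((List.replicate (N / 2) (0 : Int)).set 0 1)).length = N / 2 ∧
      ∀ i, i ≤ j →
        ((List.range' 1 j 1).foldl
            (fun W k => W.set k (PySem.Int.mod (W.getD (k - 1) 0 * w) p))
            ((List.replicate (N / 2) (0 : Int)).set 0 1)).getD i 0 = tw w p i := by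
  have hhalf : 1 ≤ N / 2 := by omega
  intro j
  induction j with
  | zero =>
    intro _
    constructor
    · simp
    · intro i hi
      obtain rfl : i = 0 := Nat.le_zero.mp hi
      show ((List.replicate (N / 2) (0 : Int)).set 0 1).getD 0 0 = 1
      obtain ⟨n', hn'⟩ : ∃ n', N / 2 = n' + 1 := ⟨N / 2 - 1, by omega⟩
      rw [hn', List.replicate_succ, List.set_cons_zero]
      rfl
  | succ j ih =>
    intro hj
    obtain ⟨ihlen, ihget⟩ := ih (by omega)
    rw [List.range'_1_concat, List.foldl_append]
    simp only [List.foldl_cons, List.foldl_nil]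
    have hidx : 1 + j < N / 2 := by omega
    refine ⟨by simp only [List.length_set]; exact ihlen, ?_⟩
    intro i hi
    have hprev : (1 + j) - 1 = j := by omega
    rw [hprev, ihget j le_rfl]
    by_cases hij : i = 1 + j
    · subst hij
      have hgo : ∀ (l : List Int) (v : Int), 1 + j < l.length →
          (l.set (1 + j) v).getD (1 + j) 0 = v := by
        intro l v hv
        simp [List.getD, List.getElem?_set, hv]
      rw [hgo _ _ (by rw [ihlen]; exact hidx)]
      show PySem.Int.mod (tw w p j * w) p = tw w p (1 + j)
      rw [Nat.add_comm]
      rfl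
    · have : i < 1 + j := by omega
      rw [show ∀ (l : List Int) (v : Int), (l.set (1 + j) v).getD i 0 = l.getD i 0
            from fun l v => by simp [List.getD, List.getElem?_set, Ne.symm hij]]
      exact ihget i (by omega)

theorem buildW_getD (w p : Int) (N : Nat) (hN : 2 ≤ N) (k : Nat) (hk : k < N / 2) :
    (buildW w p N).getD k 0 = tw w p k := by
  unfold buildW
  exact (buildW_aux w p N hN (N / 2 - 1) le_rfl).2 k (by omega)

theorem innerLoop_spec (W : List Int) (p : Int) (half step i : Nat) :
    ∀ (r k stp : Nat) (pre M mid S suf : List Int),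
      M.length = r → S.length = r → pre.length = i + k → mid.length = half - r → r ≤ half →
      innerLoop W p half step i r k stp (pre ++ M ++ mid ++ S ++ suf)
        = pre ++ (loHi W p step M S stp).1 ++ mid ++ (loHi W p step M S stp).2 ++ suf := by
  intro r
  induction r with
  | zero =>
    intro k stp pre M mid S suf hM hS hpre hmid hr
    obtain rfl : M = [] := List.length_eq_zero_iff.mp hM
    obtain rfl : S = [] := List.length_eq_zero_iff.mp hS
    simp [innerLoop, loHi]
  | succ r ih =>
    intro k stp pre M mid S suf hM hS hpre hmid hr
    cases M with
    | nil => simp at hM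
    | cons e M' =>
    cases S with
    | nil => simp at hS
    | cons o S' =>
      have hM' : M'.length = r := by simpa using hM
      have hS' : S'.length = r := by simpa using hS
      simp only [innerLoop]
      have hassoc : pre ++ (e :: M') ++ mid ++ (o :: S') ++ suf
          = pre ++ ((e :: M') ++ (mid ++ ((o :: S') ++ suf))) := by
        simp [List.append_assoc]
      have hget1 : (pre ++ (e :: M') ++ mid ++ (o :: S') ++ suf).getD (i + k) 0 = e := by
        rw [hassoc, show i + k = pre.length + 0 by omega, getD_append_len]
        rfl
      have hget2 : (pre ++ (e :: M') ++ mid ++ (o :: S') ++ suf).getD (i + k + half) 0 = o := by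
        rw [hassoc, show i + k + half = pre.length + half by omega, getD_append_len,
            show half = (e :: M').length + (half - (r + 1)) by simp [hM']; omega,
            getD_append_len,
            show half - (r + 1) = mid.length + 0 by omega, getD_append_len]
        rfl
      rw [hget1, hget2]
      set t2 := PySem.Int.mod (W.getD stp 0 * o) p with ht2
      set v1 := PySem.Int.mod (e + t2) p with hv1
      set v2 := PySem.Int.mod (e - t2) p with hv2
      have hset : ((pre ++ (e :: M') ++ mid ++ (o :: S') ++ suf).set (i + k) v1).set
            (i + k + half) v2
          = pre ++ (v1 :: M') ++ mid ++ (v2 :: S') ++ suf := by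
        have hx1 : ∀ (X : List Int), ((e :: M') ++ X).set 0 v1 = (v1 :: M') ++ X :=
          fun X => by simp
        have hx2 : ∀ (X : List Int), ((o :: S') ++ X).set 0 v2 = (v2 :: S') ++ X :=
          fun X => by simp
        rw [hassoc, show i + k = pre.length + 0 by omega, set_append_len, hx1,
            show pre.length + 0 + half = pre.length + half by omega, set_append_len,
            show half = (v1 :: M').length + (half - (r + 1)) by simp [hM']; omega,
            set_append_len,
            show half - (r + 1) = mid.length + 0 by omega, set_append_len, hx2]
        simp [List.append_assoc]
      rw [hset]
      have hre : pre ++ (v1 :: M') ++ mid ++ (v2 :: S') ++ suf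
          = (pre ++ [v1]) ++ M' ++ (mid ++ [v2]) ++ S' ++ suf := by
        simp [List.append_assoc]
      rw [hre, ih (k + 1) (stp + step) (pre ++ [v1]) M' (mid ++ [v2]) S' suf hM' hS'
            (by simp [hpre]; omega) (by simp [hmid]; omega) (by omega)]
      simp only [loHi]
      simp [List.append_assoc, hv1, hv2, ht2, List.getD]

theorem loHi_eq (W : List Int) (p : Int) (step : Nat) :
    ∀ (M S : List Int) (stp : Nat), M.length = S.length →
      loHi W p step M S stp
        = ((List.range M.length).map fun k =>
            PySem.Int.mod (M.getD k 0 + PySem.Int.mod (W.getD (stp + k * step) 0 * S.getD k 0) p) p,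
           (List.range M.length).map fun k =>
            PySem.Int.mod (M.getD k 0 - PySem.Int.mod (W.getD (stp + k * step) 0 * S.getD k 0) p) p) := by
  intro M
  induction M with
  | nil => intro S stp h; simp [loHi]
  | cons e M' ih =>
    intro S stp h
    cases S with
    | nil => simp at h
    | cons o S' =>
      have h' : M'.length = S'.length := by simpa using h
      simp only [loHi]
      rw [ih S' (stp + step) h']
      have harith : ∀ k : Nat, stp + step + k * step = stp + (k + 1) * step := by
        intro k; ring
      refine Prod.ext ?_ ?_ <;>
        simp [List.range_succ_eq_map, List.map_map, Function.comp, harith]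

theorem loHi_fst (W : List Int) (p : Int) (step : Nat) :
    ∀ (M S : List Int) (stp : Nat), M.length = S.length →
      (loHi W p step M S stp).1
        = (List.range M.length).map fun k =>
            PySem.Int.mod (M.getD k 0 + PySem.Int.mod (W.getD (stp + k * step) 0 * S.getD k 0) p) p := by
  intro M S stp h; rw [loHi_eq W p step M S stp h]

theorem loHi_snd (W : List Int) (p : Int) (step : Nat) :
    ∀ (M S : List Int) (stp : Nat), M.length = S.length →
      (loHi W p step M S stp).2
        = (List.range M.length).map fun k =>
            PySem.Int.mod (M.getD k 0 - PySem.Int.mod (W.getD (stp + k * step) 0 * S.getD k 0) p) p := by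
  intro M S stp h; rw [loHi_eq W p step M S stp h]

-- block operation performed by one outer pass at block size L = 2*half
def blockOp (W : List Int) (p : Int) (step half : Nat) (blk : List Int) : List Int :=
  (loHi W p step (blk.take half) (blk.drop half) 0).1
  ++ (loHi W p step (blk.take half) (blk.drop half) 0).2

theorem chunksOf_step (L : Nat) (hL : 0 < L) (c rest : List Int) (hc : c.length = L) :
    chunksOf L (c ++ rest) = c :: chunksOf L rest := by
  rw [chunksOf]
  have hne : ¬ (c ++ rest = [] ∨ L = 0) := by
    rintro (h1 | h2)
    · cases c with
      | nil => simp at hc; omega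
      | cons a t => simp at h1
    · omega
  rw [dif_neg hne]
  congr 1
  · rw [← hc, List.take_left]
  · rw [← hc, List.drop_left]

theorem outerLoop_spec (W : List Int) (p : Int) (N L half step : Nat)
    (hL : L = 2 * half) (hhalf : 0 < half) :
    ∀ (rest pre : List Int) (n : Nat), rest.length = n * L → pre.length + rest.length = N →
      outerLoop W p N L half step pre.length (pre ++ rest)
        = pre ++ (List.map (blockOp W p step half) (chunksOf L rest)).flatten := by
  intro rest pre n
  induction n generalizing rest pre with
  | zero =>
    intro hrest hN
    obtain rfl : rest = [] := List.length_eq_zero_iff.mp (by simpa using hrest)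
    rw [outerLoop, dif_neg (by simp at hN; omega)]
    rw [chunksOf]
    simp
  | succ n ih =>
    intro hrest hN
    have hLpos : 0 < L := by omega
    have hmul : (n + 1) * L = n * L + L := by ring
    have hrestL : L ≤ rest.length := by rw [hrest, hmul]; omega
    have hi : pre.length < N := by omega
    rw [outerLoop, dif_pos ⟨hi, hLpos⟩]
    have hblk_len : (rest.take L).length = L := by simp; omega
    have hM : ((rest.take L).take half).length = half := by simp; omega
    have hS : ((rest.take L).drop half).length = half := by simp; omega
    have hsplit : pre ++ rest
        = pre ++ ((rest.take L).take half) ++ [] ++ ((rest.take L).drop half) ++ rest.drop L := by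
      simp [List.append_assoc, List.take_append_drop]
    rw [hsplit, innerLoop_spec W p half step pre.length half 0 0 pre _ [] _ _ hM hS
          (by omega) (by simp) le_rfl]
    set M := (rest.take L).take half with hMdef
    set S := (rest.take L).drop half with hSdef
    set Lo := (loHi W p step M S 0).1 with hLodef
    set Hi := (loHi W p step M S 0).2 with hHidef
    have hMS : M.length = S.length := by rw [hM, hS]
    have hLo : Lo.length = half := by rw [hLodef, loHi_fst W p step M S 0 hMS]; simp [hM]
    have hHi : Hi.length = half := by rw [hHidef, loHi_snd W p step M S 0 hMS]; simp [hM]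
    have hform : pre ++ Lo ++ [] ++ Hi ++ rest.drop L = (pre ++ (Lo ++ Hi)) ++ rest.drop L := by
      simp [List.append_assoc]
    have hidx : pre.length + L = (pre ++ (Lo ++ Hi)).length := by
      simp [hLo, hHi]; omega
    have hrest' : (rest.drop L).length = n * L := by simp [hrest, hmul]
    have hN' : (pre ++ (Lo ++ Hi)).length + (rest.drop L).length = N := by
      simp [hLo, hHi]
      omega
    rw [hform, hidx, ih (rest.drop L) (pre ++ (Lo ++ Hi)) hrest' hN']
    have hchunks : chunksOf L rest = rest.take L :: chunksOf L (rest.drop L) := by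
      conv_lhs => rw [← List.take_append_drop L rest]
      exact chunksOf_step L hLpos _ _ hblk_len
    rw [hchunks]
    simp only [List.map_cons, List.flatten_cons]
    have hblockOp : blockOp W p step half (rest.take L) = Lo ++ Hi := rfl
    rw [hblockOp]
    first
    | rfl
    | simp [List.append_assoc]

theorem chunksOf_nil (L : Nat) : chunksOf L [] = [] := by
  rw [chunksOf]; simp

theorem pow_shiftr (a : Nat) : (2 ^ (a + 1)) >>> 1 = 2 ^ a := by
  rw [Nat.shiftRight_eq_div_pow, pow_one, pow_succ, Nat.mul_div_cancel _ (by omega)]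

theorem pow_shiftl (a : Nat) : (2 ^ a) <<< 1 = 2 ^ (a + 1) := by
  rw [Nat.shiftLeft_eq, pow_one, pow_succ]

theorem G_length (Wf : Nat → Int) (p : Int) (s e : Nat) :
    ∀ (n : Nat) (y : List Int), y.length = n * 2 ^ e →
      ((chunksOf (2 ^ e) y).map (modelC Wf p s e)).flatten.length = y.length := by
  intro n
  induction n with
  | zero =>
    intro y hy
    obtain rfl : y = [] := List.length_eq_zero_iff.mp (by simpa using hy)
    rw [chunksOf_nil]
    rfl
  | succ n ih =>
    intro y hy
    have hpos : (0:Nat) < 2 ^ e := Nat.two_pow_pos e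
    have hmul : (n + 1) * 2 ^ e = n * 2 ^ e + 2 ^ e := by ring
    have hyL : 2 ^ e ≤ y.length := by rw [hy, hmul]; omega
    have hc : (y.take (2 ^ e)).length = 2 ^ e := by simp; omega
    have hsplit : chunksOf (2 ^ e) y = y.take (2 ^ e) :: chunksOf (2 ^ e) (y.drop (2 ^ e)) := by
      conv_lhs => rw [← List.take_append_drop (2 ^ e) y]
      exact chunksOf_step _ hpos _ _ hc
    rw [hsplit]
    simp only [List.map_cons, List.flatten_cons, List.length_append]
    rw [ih (y.drop (2 ^ e)) (by simp [hy, hmul]), modelC_length _ _ _ _ _ hc]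
    simp
    omega

theorem mapBlock (W : List Int) (p w : Int) (m j : Nat)
    (hW : ∀ k, k < 2 ^ m / 2 → W.getD k 0 = tw w p k) (hj : j < m) :
    ∀ (n : Nat) (y : List Int), y.length = n * 2 ^ (j + 1) →
      (List.map (blockOp W p (2 ^ (m - j - 1)) (2 ^ j))
          (chunksOf (2 ^ (j + 1))
            ((chunksOf (2 ^ j) y).map (modelC (tw w p) p (2 ^ (m - j)) j)).flatten)).flatten
        = ((chunksOf (2 ^ (j + 1)) y).map (modelC (tw w p) p (2 ^ (m - j - 1)) (j + 1))).flatten := by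
  intro n
  induction n with
  | zero =>
    intro y hy
    obtain rfl : y = [] := List.length_eq_zero_iff.mp (by simpa using hy)
    rw [chunksOf_nil, chunksOf_nil]
    simp [chunksOf_nil]
  | succ n ih =>
    intro y hy
    have hposj : (0:Nat) < 2 ^ j := Nat.two_pow_pos j
    have hposj1 : (0:Nat) < 2 ^ (j + 1) := Nat.two_pow_pos (j + 1)
    have hp1 : (2:Nat) ^ (j + 1) = 2 ^ j + 2 ^ j := by rw [pow_succ]; ring
    have hmul : (n + 1) * 2 ^ (j + 1) = n * 2 ^ (j + 1) + 2 ^ (j + 1) := by ring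
    have hyL : 2 ^ (j + 1) ≤ y.length := by rw [hy, hmul]; omega
    set c := y.take (2 ^ (j + 1)) with hcdef
    set y' := y.drop (2 ^ (j + 1)) with hy'def
    have hc : c.length = 2 ^ (j + 1) := by simp [hcdef]; omega
    have hy' : y'.length = n * 2 ^ (j + 1) := by simp [hy'def, hy, hmul]
    set c1 := c.take (2 ^ j) with hc1def
    set c2 := c.drop (2 ^ j) with hc2def
    have hc1 : c1.length = 2 ^ j := by simp [hc1def, hc]; omega
    have hc2 : c2.length = 2 ^ j := by simp [hc2def, hc]; omega
    set T := modelC (tw w p) p (2 ^ (m - j)) j with hTdef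
    have hchunksj : chunksOf (2 ^ j) y = c1 :: c2 :: chunksOf (2 ^ j) y' := by
      conv_lhs => rw [← List.take_append_drop (2 ^ (j + 1)) y]
      rw [← hcdef, ← hy'def]
      conv_lhs => rw [← List.take_append_drop (2 ^ j) c, ← hc1def, ← hc2def,
        List.append_assoc]
      rw [chunksOf_step _ hposj _ _ hc1, chunksOf_step _ hposj _ _ hc2]
    rw [hchunksj]
    simp only [List.map_cons, List.flatten_cons]
    have hTc1 : (T c1).length = 2 ^ j := by rw [hTdef, modelC_length _ _ _ _ _ hc1, hc1]
    have hTc2 : (T c2).length = 2 ^ j := by rw [hTdef, modelC_length _ _ _ _ _ hc2, hc2]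
    have hassoc : T c1 ++ (T c2 ++ ((chunksOf (2 ^ j) y').map T).flatten)
        = (T c1 ++ T c2) ++ ((chunksOf (2 ^ j) y').map T).flatten := by
      simp [List.append_assoc]
    rw [hassoc, chunksOf_step _ hposj1 _ _ (by simp [hTc1, hTc2]; omega)]
    simp only [List.map_cons, List.flatten_cons]
    rw [ih y' hy']
    have hchunksj1 : chunksOf (2 ^ (j + 1)) y = c :: chunksOf (2 ^ (j + 1)) y' := by
      conv_lhs => rw [← List.take_append_drop (2 ^ (j + 1)) y]
      exact chunksOf_step _ hposj1 _ _ hc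
    rw [hchunksj1]
    simp only [List.map_cons, List.flatten_cons]
    congr 1
    -- head block: blockOp (T c1 ++ T c2) = modelC level j+1 of c
    have htake : (T c1 ++ T c2).take (2 ^ j) = T c1 := by
      rw [← hTc1, List.take_left]
    have hdrop : (T c1 ++ T c2).drop (2 ^ j) = T c2 := by
      rw [← hTc1, List.drop_left]
    have hTT : (T c1).length = (T c2).length := by rw [hTc1, hTc2]
    have hstride : 2 * 2 ^ (m - j - 1) = 2 ^ (m - j) := by
      rw [mul_comm, ← pow_succ]
      congr 1
      omega
    have hWtw : ∀ k, k < 2 ^ j → W.getD (0 + k * 2 ^ (m - j - 1)) 0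
        = tw w p (k * 2 ^ (m - j - 1)) := by
      intro k hk
      rw [Nat.zero_add]
      apply hW
      have h1 : k * 2 ^ (m - j - 1) < 2 ^ j * 2 ^ (m - j - 1) :=
        (Nat.mul_lt_mul_right (Nat.two_pow_pos _)).mpr hk
      have h2 : (2:Nat) ^ j * 2 ^ (m - j - 1) = 2 ^ (m - 1) := by
        rw [← pow_add]
        congr 1
        omega
      have h3 : (2:Nat) ^ m / 2 = 2 ^ (m - 1) := by
        have hm : m = (m - 1) + 1 := by omega
        conv_lhs => rw [hm]
        rw [pow_succ, Nat.mul_div_cancel _ (by omega)]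
      omega
    show blockOp W p (2 ^ (m - j - 1)) (2 ^ j) (T c1 ++ T c2)
        = modelC (tw w p) p (2 ^ (m - j - 1)) (j + 1) c
    rw [show modelC (tw w p) p (2 ^ (m - j - 1)) (j + 1) c
          = bfly (tw w p) p (2 ^ (m - j - 1))
              (modelC (tw w p) p (2 * 2 ^ (m - j - 1)) j (c.take (2 ^ j)))
              (modelC (tw w p) p (2 * 2 ^ (m - j - 1)) j (c.drop (2 ^ j))) from rfl]
    rw [hstride, ← hc1def, ← hc2def, ← hTdef]
    unfold blockOp
    rw [htake, hdrop, loHi_fst W p _ _ _ _ hTT, loHi_snd W p _ _ _ _ hTT]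
    unfold bfly
    congr 1
    · apply List.map_congr_left
      intro k hk
      rw [hWtw k (by rw [← hTc1]; exact List.mem_range.mp hk)]
    · rw [hTc1, ← hTc2]
      apply List.map_congr_left
      intro k hk
      rw [hWtw k (by rw [← hTc2]; exact List.mem_range.mp hk)]

theorem flatten_chunksOf (L : Nat) (hL : 0 < L) :
    ∀ (n : Nat) (y : List Int), y.length ≤ n → (chunksOf L y).flatten = y := by
  intro n
  induction n with
  | zero =>
    intro y hy
    have : y = [] := by cases y <;> simp_all
    subst this
    rw [chunksOf]
    simp
  | succ n ih =>
    intro y hy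
    rw [chunksOf]
    by_cases hy0 : y = [] ∨ L = 0
    · rcases hy0 with h1 | h2
      · subst h1; simp
      · omega
    · rw [dif_neg hy0]
      have hylen : y.length ≠ 0 := by
        intro h0; exact (not_or.mp hy0).1 (List.length_eq_zero_iff.mp h0)
      simp only [List.flatten_cons]
      rw [ih (y.drop L) (by simp; omega)]
      exact List.take_append_drop L y

theorem G0 (Wf : Nat → Int) (p : Int) (N0 : Nat) (y : List Int) :
    (List.map (modelC Wf p N0 0) (chunksOf 1 y)).flatten = y := by
  have : modelC Wf p N0 0 = id := rfl
  rw [this, List.map_id]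
  exact flatten_chunksOf 1 (by omega) y.length y le_rfl

theorem keyStage (W : List Int) (p : Int) (w : Int) (N m j : Nat)
    (hW : ∀ k, k < N / 2 → W.getD k 0 = tw w p k)
    (hN : N = 2 ^ m) (hj : j < m) :
    ∀ (y : List Int), y.length = N →
      outerLoop W p N (2 ^ (j + 1)) (2 ^ j) (2 ^ (m - j - 1)) 0
          (List.map (modelC (tw w p) p (2 ^ (m - j)) j) (chunksOf (2 ^ j) y)).flatten
        = (List.map (modelC (tw w p) p (2 ^ (m - j - 1)) (j + 1)) (chunksOf (2 ^ (j + 1)) y)).flatten := by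
  subst hN
  intro y hy
  have hyG : y.length = 2 ^ (m - j) * 2 ^ j := by
    rw [hy, ← pow_add]
    congr 1
    omega
  have hGlen : ((chunksOf (2 ^ j) y).map (modelC (tw w p) p (2 ^ (m - j)) j)).flatten.length
      = y.length := G_length _ _ _ _ (2 ^ (m - j)) y hyG
  have hGn : ((chunksOf (2 ^ j) y).map (modelC (tw w p) p (2 ^ (m - j)) j)).flatten.length
      = 2 ^ (m - j - 1) * 2 ^ (j + 1) := by
    rw [hGlen, hy, ← pow_add]
    congr 1
    omega
  have h0 := outerLoop_spec W p (2 ^ m) (2 ^ (j + 1)) (2 ^ j) (2 ^ (m - j - 1))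
    (by rw [pow_succ]; ring) (Nat.two_pow_pos j)
    ((chunksOf (2 ^ j) y).map (modelC (tw w p) p (2 ^ (m - j)) j)).flatten []
    (2 ^ (m - j - 1)) hGn (by simp [hGlen, hy])
  simp only [List.length_nil, List.nil_append] at h0
  rw [h0]
  exact mapBlock W p w m j hW hj (2 ^ (m - j - 1)) y
    (by rw [hy, ← pow_add]; congr 1; omega)

theorem stage_inv (W : List Int) (p : Int) (w : Int) (N m : Nat)
    (hW : ∀ k, k < N / 2 → W.getD k 0 = tw w p k) (hN : N = 2 ^ m) :
    ∀ (d j : Nat), j + d + 1 = m → ∀ (y : List Int), y.length = N →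
      stageLoop W p N (2 ^ (j + 1)) (2 ^ (m - j - 1))
          (List.map (modelC (tw w p) p (2 ^ (m - j)) j) (chunksOf (2 ^ j) y)).flatten
        = modelC (tw w p) p 1 m y := by
  subst hN
  intro d
  induction d with
  | zero =>
    intro j hj y hy
    have hjm : j + 1 = m := by omega
    have h2le : 2 ≤ 2 ^ (j + 1) := by
      calc (2:Nat) = 2 ^ 1 := rfl
        _ ≤ 2 ^ (j + 1) := Nat.pow_le_pow_right (by omega) (by omega)
    rw [stageLoop, dif_pos ⟨by rw [hjm], h2le⟩, pow_shiftr j,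
        keyStage W p w (2 ^ m) m j hW rfl (by omega) y hy, stageLoop]
    have hncond : ¬(2 ^ (j + 1) <<< 1 ≤ 2 ^ m ∧ 2 ≤ 2 ^ (j + 1) <<< 1) := by
      rw [pow_shiftl]
      rintro ⟨hle, -⟩
      have : (2:Nat) ^ m < 2 ^ (j + 1 + 1) :=
        Nat.pow_lt_pow_right (by omega) (by omega)
      omega
    rw [dif_neg hncond]
    have hchunks : chunksOf (2 ^ (j + 1)) y = [y] := by
      conv_lhs => rw [← List.append_nil y]
      rw [chunksOf_step _ (Nat.two_pow_pos _) y [] (by rw [hy, hjm]), chunksOf_nil]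
    rw [hchunks]
    simp only [List.map_cons, List.map_nil, List.flatten_cons, List.flatten_nil,
      List.append_nil]
    rw [show m - j - 1 = 0 from by omega, pow_zero, hjm]
  | succ d ihd =>
    intro j hj y hy
    have h2le : 2 ≤ 2 ^ (j + 1) := by
      calc (2:Nat) = 2 ^ 1 := rfl
        _ ≤ 2 ^ (j + 1) := Nat.pow_le_pow_right (by omega) (by omega)
    have hle : 2 ^ (j + 1) ≤ 2 ^ m := Nat.pow_le_pow_right (by omega) (by omega)
    rw [stageLoop, dif_pos ⟨hle, h2le⟩, pow_shiftr j,
        keyStage W p w (2 ^ m) m j hW rfl (by omega) y hy, pow_shiftl (j + 1)]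
    have hs : 2 ^ (m - j - 1) >>> 1 = 2 ^ (m - j - 2) := by
      rw [show m - j - 1 = (m - j - 2) + 1 from by omega, pow_shiftr]
    rw [hs]
    have hrec := ihd (j + 1) (by omega) y hy
    rw [show m - (j + 1) - 1 = m - j - 2 from by omega,
        show m - (j + 1) = m - j - 1 from by omega] at hrec
    exact hrec

theorem foldl_pair_set_length (f : List Int × Nat → Nat → List Int × Nat)
    (hf : ∀ st i, (f st i).1.length = st.1.length) :
    ∀ (l : List Nat) (st : List Int × Nat), ((l.foldl f st).1).length = st.1.length := by
  intro l
  induction l with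
  | nil => intro st; rfl
  | cons a l ih => intro st; rw [List.foldl_cons, ih, hf]

theorem brp_length (x : List Int) : (bit_reversal_permutation x).length = x.length := by
  unfold bit_reversal_permutation
  rw [foldl_pair_set_length]
  intro st i
  dsimp only
  split <;> simp

theorem mod_FFT_spec : Claim_equal_mod_FFT := by
  intro x w p _ hpre
  obtain ⟨hpow, hp1⟩ := hpre
  show mod_FFT x w p = mod_FFT_alt x w p
  unfold mod_FFT mod_FFT_alt
  by_cases h1 : x.length = 1
  · simp [h1]
  · have hbe : (x.length == 1) = false := by simp [h1]
    rw [hbe]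
    simp only [Bool.false_eq_true, if_false]
    have hm1 : 1 ≤ Nat.log2 x.length := by
      by_contra h
      have h0 : Nat.log2 x.length = 0 := by omega
      rw [h0] at hpow
      simp at hpow
      exact h1 hpow
    have hN2 : 2 ≤ x.length := by
      rw [hpow]
      calc (2:Nat) = 2 ^ 1 := rfl
        _ ≤ 2 ^ Nat.log2 x.length := Nat.pow_le_pow_right (by omega) hm1
    have hpne : p ≠ 0 := by
      rcases hp1 with h | h
      · exact absurd h h1
      · exact h
    have hy : (bit_reversal_permutation x).length = x.length := brp_length x
    have hy2 : (bit_reversal_permutation x).length = 2 ^ Nat.log2 x.length := by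
      rw [hy]
      exact hpow
    rw [combineRec_eq_modelC w p (Nat.log2 x.length) _ hy2]
    have hWc : ∀ k, k < x.length / 2 → (buildW w p x.length).getD k 0 = tw w p k :=
      fun k hk => buildW_getD w p x.length hN2 k hk
    have hstart := stage_inv (buildW w p x.length) p w x.length (Nat.log2 x.length)
      hWc hpow (Nat.log2 x.length - 1) 0 (by omega) (bit_reversal_permutation x) hy
    simp only [Nat.sub_zero, pow_zero] at hstart
    have e2 : (2:Nat) ^ (0 + 1) = 2 := by norm_num
    rw [e2, G0 (tw w p) p (2 ^ Nat.log2 x.length) (bit_reversal_permutation x)] at hstart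
    have hsh : x.length >>> 1 = 2 ^ (Nat.log2 x.length - 1) := by
      conv_lhs => rw [hpow, show Nat.log2 x.length = (Nat.log2 x.length - 1) + 1
        from by omega]
      rw [pow_shiftr]
    rw [hsh]
    exact hstart
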